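-- pv_equiv track=rewrite | github.com/gerardm27/Estrematic | main.py | estrematize
-- ===== SOURCE A (Python) =====
-- exception_object = {
--     "si" : "is",
--     "no" : "on",
--     "pau" : "uap",
--     "bernat" : "natber",
--     "jordi" : "dijor",
--     "nico" : "coni",
--     "marc" : "rcma",
--     "gerard" : "rar",
--     "nacho" : "chona",
--     "miner" : "nermi",
--     "tontito" : "titon",
--     "tontita" : "titon",
--     "perdo" : "doper",
-- }
--
-- def estrematize(word):
--
--     if word in exception_object:
--         return exception_object[word]
--     else:
--         # Si nomes es una lletra, retornem
--         if len(word) == 1 or len(word) == 2: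
--             return word
--
--         # Si es mes de una lletra, estrematitzem la paraula
--         vocals = "aeiou"
--         diftongs = ["ai", "ei", "oi", "ui", "au", "eu", "iu", "ou", "ia", "ie", "io", "iu", "ua", "ue", "ui", "uo"]
--         silabes = []
--         silaba = ""
--         prev_letter = ""
--         for letter in word:
--             silaba += letter
--             if letter in vocals:
--                 if prev_letter+letter not in diftongs:
--                     silabes.append(silaba)
--                     silaba = ""
--             prev_letter = letter
--
--         if silaba:  # si hi ha una última sil·laba sense vocal, l'afegim
--             silabes.append(silaba)
--
--         if len(silabes) == 1:
--             return silabes[0]  # si només hi ha una sil·laba, la retornem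
--         else:
--             return silabes[-1] + ''.join(silabes[:-1])  # si hi ha més d'una, posem l'última al davant i unim les altres
-- ===== SOURCE B (Python) =====
-- exception_object = {
--     "si" : "is",
--     "no" : "on",
--     "pau" : "uap",
--     "bernat" : "natber",
--     "jordi" : "dijor",
--     "nico" : "coni",
--     "marc" : "rcma",
--     "gerard" : "rar",
--     "nacho" : "chona",
--     "miner" : "nermi",
--     "tontito" : "titon",
--     "tontita" : "titon",
--     "perdo" : "doper",
-- }
--
-- def estrematize(word):
--     if word in exception_object:
--         return exception_object[word]
--     if len(word) <= 2:
--         return word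
--     vocals = "aeiou"
--     diftongs = ["ai", "ei", "oi", "ui", "au", "eu", "iu", "ou", "ia", "ie", "io", "iu", "ua", "ue", "ui", "uo"]
--     # start = index just past the last syllable boundary seen; last = the boundary before it
--     start = last = 0
--     prev = ""
--     for i, letter in enumerate(word):
--         if letter in vocals and prev + letter not in diftongs:
--             last, start = start, i + 1
--         prev = letter
--     cut = start if start < len(word) else last
--     return word[cut:] + word[:cut]
-- ===== Notes on version B (the rewrite author's own statement) =====
-- stated objective: simpler
-- what changed: Instead of accumulating a list of syllable strings and re-joining them, B tracks two integer boundary indices (start of the current and of the last completed syllable) during one scan and returns the rotation word[cut:] + word[:cut] by slicing.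
import Mathlib
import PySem

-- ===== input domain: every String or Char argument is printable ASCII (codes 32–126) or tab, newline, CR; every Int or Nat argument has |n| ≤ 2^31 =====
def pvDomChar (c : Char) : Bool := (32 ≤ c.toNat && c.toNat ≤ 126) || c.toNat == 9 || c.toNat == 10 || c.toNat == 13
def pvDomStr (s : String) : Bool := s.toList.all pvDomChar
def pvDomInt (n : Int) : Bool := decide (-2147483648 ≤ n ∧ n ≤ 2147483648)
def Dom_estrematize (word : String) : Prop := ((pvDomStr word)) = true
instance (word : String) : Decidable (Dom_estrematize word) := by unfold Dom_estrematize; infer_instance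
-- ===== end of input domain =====

-- B replaces A's syllable-list accumulation (list of strings + join) by two integer
-- boundary indices and a final slice rotation: simpler state, no string building in the loop.

-- ===== PORT A =====
def pvExc : PySem.Dict String String := PySem.Dict.ofList
  [("si", "is"), ("no", "on"), ("pau", "uap"), ("bernat", "natber"),
   ("jordi", "dijor"), ("nico", "coni"), ("marc", "rcma"), ("gerard", "rar"),
   ("nacho", "chona"), ("miner", "nermi"), ("tontito", "titon"),
   ("tontita", "titon"), ("perdo", "doper")]

def pvVocals : List Char := ['a', 'e', 'i', 'o', 'u']

def pvDiftongs : List (List Char) :=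
  [['a','i'], ['e','i'], ['o','i'], ['u','i'], ['a','u'], ['e','u'], ['i','u'], ['o','u'],
   ['i','a'], ['i','e'], ['i','o'], ['i','u'], ['u','a'], ['u','e'], ['u','i'], ['u','o']]

-- A's for-loop: state (silabes, silaba, prev_letter), strings as List Char
def loopA : List Char → List Char → List (List Char) → List Char → List (List Char) × List Char
  | [], _, silabes, silaba => (silabes, silaba)
  | c :: cs, prev, silabes, silaba =>
      let silaba' := silaba ++ [c]
      if pvVocals.contains c && !(pvDiftongs.contains (prev ++ [c])) then
        loopA cs [c] (silabes ++ [silaba']) []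
      else
        loopA cs [c] silabes silaba'

def estrematize (word : String) : String :=
  match PySem.Dict.get? pvExc word with
  | some v => v
  | none =>
      if word.toList.length == 1 || word.toList.length == 2 then word
      else
        let st := loopA word.toList [] [] []
        let silabes := if st.2 ≠ [] then st.1 ++ [st.2] else st.1
        if silabes.length == 1 then String.ofList (silabes.headD [])
        else
          match silabes.getLast? with
          | none => ""   -- Python: silabes[-1] raises IndexError here (only word = ""); excluded by Pre_
          | some last => String.ofList (last ++ silabes.dropLast.flatten)

-- ===== PORT B =====
-- B's for-loop over enumerate(word): state (last, start), prev threaded; i is the running index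
def loopB : List Char → Nat → List Char → Nat → Nat → Nat × Nat
  | [], _, _, last, start => (last, start)
  | c :: cs, i, prev, last, start =>
      if pvVocals.contains c && !(pvDiftongs.contains (prev ++ [c])) then
        loopB cs (i + 1) [c] start (i + 1)
      else
        loopB cs (i + 1) [c] last start

def estrematize_alt (word : String) : String :=
  match PySem.Dict.get? pvExc word with
  | some v => v
  | none =>
      if word.toList.length ≤ 2 then word
      else
        let cs := word.toList
        let ls := loopB cs 0 [] 0 0
        let cut := if ls.2 < cs.length then ls.2 else ls.1
        -- word[cut:] + word[:cut] with 0 ≤ cut ≤ len(word): exact as drop/take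
        String.ofList (cs.drop cut ++ cs.take cut)

-- ===== PRECONDITION & SPEC =====
-- Pre_ excludes only the empty string, on which A raises IndexError (silabes[-1] of an empty list).
def Pre_estrematize (word : String) : Prop := word ≠ ""
instance (word : String) : Decidable (Pre_estrematize word) := by unfold Pre_estrematize; infer_instance
def pvWitness_estrematize : String := "casa"

def Spec_estrematize (word : String) (out : String) : Prop := out = estrematize_alt word
instance (word : String) (out : String) : Decidable (Spec_estrematize word out) := by unfold Spec_estrematize; infer_instance

-- ===== CLAIM (what is proved, stated in full; the proofs are below) =====
def Claim_equal_estrematize : Prop := ∀ (word : String), Dom_estrematize word → Pre_estrematize word → Spec_estrematize word (estrematize word)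

-- ===== LEMMAS AND PROOFS =====

-- The two loops simulate each other: B's (last, start) are the flattened lengths of
-- A's dropLast silabes / silabes, and A's pieces concatenate to the processed input.
lemma loop_rel (rest : List Char) : ∀ (prev : List Char) (silabes : List (List Char)) (silaba : List Char),
    loopB rest (silabes.flatten.length + silaba.length) prev
      silabes.dropLast.flatten.length silabes.flatten.length
      = ((loopA rest prev silabes silaba).1.dropLast.flatten.length,
         (loopA rest prev silabes silaba).1.flatten.length)
    ∧ (loopA rest prev silabes silaba).1.flatten ++ (loopA rest prev silabes silaba).2
        = silabes.flatten ++ silaba ++ rest := by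
  induction rest with
  | nil => intro prev silabes silaba; simp [loopA, loopB]
  | cons c cs ih =>
      intro prev silabes silaba
      cases hcond : (pvVocals.contains c && !(pvDiftongs.contains (prev ++ [c]))) with
      | true =>
          have := ih [c] (silabes ++ [silaba ++ [c]]) []
          simp only [List.flatten_append, List.flatten_cons, List.flatten_nil,
            List.dropLast_concat, List.append_nil, List.length_append,
            List.length_cons, List.length_nil] at this
          simp only [loopA, loopB, hcond, if_true]
          rw [show silabes.flatten.length + silaba.length + 1
              = silabes.flatten.length + (silaba.length + (0 + 1)) + 0 by omega]
          refine ⟨this.1, ?_⟩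
          rw [this.2]; simp
      | false =>
          have := ih [c] silabes (silaba ++ [c])
          simp only [List.length_append, List.length_cons, List.length_nil] at this
          simp only [loopA, loopB, hcond, Bool.false_eq_true, if_false]
          rw [show silabes.flatten.length + silaba.length + 1
              = silabes.flatten.length + (silaba.length + (0 + 1)) by omega]
          refine ⟨this.1, ?_⟩
          rw [this.2]; simp

lemma core_eq (cs : List Char) (hne : cs ≠ []) :
    (let st := loopA cs [] [] []
     let silabes := if st.2 ≠ [] then st.1 ++ [st.2] else st.1
     if silabes.length == 1 then String.ofList (silabes.headD [])
     else
       match silabes.getLast? with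
       | none => ""
       | some last => String.ofList (last ++ silabes.dropLast.flatten))
    = (let ls := loopB cs 0 [] 0 0
       let cut := if ls.2 < cs.length then ls.2 else ls.1
       String.ofList (cs.drop cut ++ cs.take cut)) := by
  obtain ⟨hB, hcat⟩ := loop_rel cs [] [] []
  simp only [List.flatten_nil, List.length_nil, List.dropLast_nil, List.nil_append,
    Nat.add_zero] at hB hcat
  obtain ⟨S, b, hAB⟩ : ∃ S b, loopA cs [] [] [] = (S, b) := ⟨_, _, rfl⟩
  rw [hAB] at hB hcat
  simp only [hAB, hB]
  by_cases hbe : b = []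
  · -- last syllable ends the word: silabes = S, start = cs.length
    subst hbe
    simp only [List.append_nil] at hcat
    have hstart : S.flatten.length = cs.length := by rw [hcat]
    show (if (S.length == 1) = true then String.ofList (S.headD [])
          else match S.getLast? with
               | none => ""
               | some last => String.ofList (last ++ S.dropLast.flatten))
        = String.ofList (cs.drop (if S.flatten.length < cs.length then S.flatten.length
              else S.dropLast.flatten.length)
            ++ cs.take (if S.flatten.length < cs.length then S.flatten.length
              else S.dropLast.flatten.length))
    rw [hstart, if_neg (lt_irrefl _)]
    rcases S.eq_nil_or_concat with hSnil | ⟨T, x, hTx⟩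
    · exact absurd (by rw [← hcat, hSnil]; rfl) hne
    · subst hTx
      simp only [List.concat_eq_append] at hcat hstart ⊢
      by_cases h1 : ((T ++ [x]).length == 1) = true
      · have hT : T = [] := by
          simp only [List.length_append, List.length_cons, List.length_nil, beq_iff_eq] at h1
          exact List.eq_nil_of_length_eq_zero (by omega)
        subst hT
        simp [← hcat]
      · simp only [h1, List.getLast?_concat, List.dropLast_concat]
        have hx : cs = T.flatten ++ x := by rw [← hcat]; simp
        rw [hx]
        simp
  · -- trailing letters: silabes = S ++ [b], start = S.flatten.length < cs.length
    simp only [ne_eq, hbe, not_false_eq_true, if_true]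
    have hlen : S.flatten.length + b.length = cs.length := by
      rw [← hcat]; simp
    have hlt : S.flatten.length < cs.length := by
      have : b.length ≠ 0 := fun h => hbe (List.eq_nil_of_length_eq_zero h)
      omega
    simp only [hlt, if_true]
    have hdrop : cs.drop S.flatten.length = b := by
      rw [← hcat]; simp
    have htake : cs.take S.flatten.length = S.flatten := by
      rw [← hcat]; simp
    by_cases h1 : ((S ++ [b]).length == 1) = true
    · have hSnil : S = [] := by
        simp only [List.length_append, List.length_cons, List.length_nil, beq_iff_eq] at h1
        exact List.eq_nil_of_length_eq_zero (by omega)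
      subst hSnil
      simp only [List.nil_append, List.headD]
      simp only [List.flatten_nil, List.length_nil, List.drop_zero, List.take_zero,
        List.append_nil] at hdrop ⊢
      rw [hdrop]
      simp
    · simp only [h1, List.getLast?_concat, List.dropLast_concat, hdrop, htake]
      simp

-- ===== VERDICT (by name: the statement is the Claim_ definition above) =====
theorem estrematize_spec : Claim_equal_estrematize := by
  intro word _hdom hpre
  unfold Spec_estrematize estrematize estrematize_alt
  cases hget : PySem.Dict.get? pvExc word with
  | some v => rfl
  | none =>
      have hne : word.toList ≠ [] := fun h => hpre (String.toList_eq_nil_iff.mp h)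
      by_cases h12 : (word.toList.length == 1 || word.toList.length == 2) = true
      · have hle : word.toList.length ≤ 2 := by
          rcases Bool.or_eq_true_iff.mp h12 with h | h <;>
            simp only [beq_iff_eq] at h <;> omega
        simp only [h12, hle, if_pos]
      · have h3 : ¬ word.toList.length ≤ 2 := by
          simp only [Bool.or_eq_true, beq_iff_eq, not_or] at h12
          have h0 : word.toList.length ≠ 0 := fun h => hne (List.eq_nil_of_length_eq_zero h)
          omega
        simp only [h12, if_false, h3]
        exact core_eq word.toList hne
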